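-- pv_equiv track=rewrite | github.com/krzemienski/shannon-mcp | src/shannon_mcp/managers/tool_result_handler.py | _parse_websearch_results
-- ===== SOURCE A (Python) =====
-- from typing import Any, Dict, List, Optional, Union, Callable
--
-- def _parse_websearch_results(content: str) -> List[Dict[str, str]]:
--     """Parse web search results into structured format."""
--     results = []
--     # Simple pattern matching for URLs and titles
--     lines = content.split('\n')
--     current_result = {}
--
--     for line in lines:
--         if line.startswith('Title:'):
--             if current_result:
--                 results.append(current_result)
--             current_result = {'title': line[6:].strip()}
--         elif line.startswith('URL:'):
--             current_result['url'] = line[4:].strip()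
--         elif line.startswith('Description:'):
--             current_result['description'] = line[12:].strip()
--
--     if current_result:
--         results.append(current_result)
--
--     return results
-- ===== SOURCE B (Python) =====
-- # B: two-phase pipeline — split lines into segments at 'Title:' lines, then parse each segment
-- # independently via a prefix table, keeping only non-empty dicts.
--
-- _PREFIXES = [('Title:', 'title'), ('URL:', 'url'), ('Description:', 'description')]
--
--
-- def _parse_segment(seg):
--     d = {}
--     for line in seg:
--         hit = next(((p, k) for p, k in _PREFIXES if line.startswith(p)), None)
--         if hit is not None:
--             p, k = hit
--             d[k] = line[len(p):].strip()
--     return d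
--
--
-- def _parse_websearch_results(content):
--     lines = content.split('\n')
--     segments = [[]]
--     for line in lines:
--         if line.startswith('Title:'):
--             segments.append([line])
--         else:
--             segments[-1].append(line)
--     return [d for d in map(_parse_segment, segments) if d]
-- ===== Notes on version B (the rewrite author's own statement) =====
-- stated objective: alternative
-- what changed: Replaces A's single stateful accumulate-and-flush pass (results list + current dict mutated per line) with a two-phase pipeline: first partition the lines into segments at each 'Title:' line, then parse every segment independently via a prefix table and keep the non-empty dicts.
import Mathlib
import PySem

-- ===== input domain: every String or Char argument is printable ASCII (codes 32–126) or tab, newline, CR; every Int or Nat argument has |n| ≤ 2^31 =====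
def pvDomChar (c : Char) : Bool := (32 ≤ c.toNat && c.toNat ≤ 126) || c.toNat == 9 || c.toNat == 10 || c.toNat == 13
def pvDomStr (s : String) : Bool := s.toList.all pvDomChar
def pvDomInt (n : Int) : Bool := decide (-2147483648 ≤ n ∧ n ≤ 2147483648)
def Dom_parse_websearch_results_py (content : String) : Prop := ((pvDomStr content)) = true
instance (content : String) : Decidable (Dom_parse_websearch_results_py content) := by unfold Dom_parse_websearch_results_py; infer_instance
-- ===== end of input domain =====

-- B changes the decomposition only (segment-then-parse instead of one stateful flush pass); same cost, not claimed faster.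

-- ===== PORT A =====
-- A's loop body: flush current on 'Title:', otherwise update current in place.
def pvStepA (st : List (PySem.Dict String String) × PySem.Dict String String) (line : String) :
    List (PySem.Dict String String) × PySem.Dict String String :=
  if PySem.Str.startswith line "Title:" then
    ((if st.2.items.isEmpty then st.1 else st.1 ++ [st.2]),
     PySem.Dict.insert PySem.Dict.empty "title" (PySem.Str.strip (PySem.Str.slice line (some 6) none)))
  else if PySem.Str.startswith line "URL:" then
    (st.1, st.2.insert "url" (PySem.Str.strip (PySem.Str.slice line (some 4) none)))
  else if PySem.Str.startswith line "Description:" then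
    (st.1, st.2.insert "description" (PySem.Str.strip (PySem.Str.slice line (some 12) none)))
  else st

def parse_websearch_results_py (content : String) : List (List (String × String)) :=
  let lines := (PySem.Str.split? content "\n").getD []   -- sep ≠ "", so split? is always some
  let st := lines.foldl pvStepA ([], PySem.Dict.empty)
  (if st.2.items.isEmpty then st.1 else st.1 ++ [st.2]).map PySem.Dict.items

-- ===== PORT B =====
def pvPrefixes : List (String × String) :=
  [("Title:", "title"), ("URL:", "url"), ("Description:", "description")]

-- next((… for p,k in _PREFIXES if line.startswith(p)), None) then d[k] = line[len(p):].strip()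
def pvStepSeg (d : PySem.Dict String String) (line : String) : PySem.Dict String String :=
  match pvPrefixes.find? (fun pk => PySem.Str.startswith line pk.1) with
  | some pk => d.insert pk.2 (PySem.Str.strip (PySem.Str.slice line (some (PySem.Str.len pk.1)) none))
  | none => d

def pvParseSegment (seg : List String) : PySem.Dict String String :=
  seg.foldl pvStepSeg PySem.Dict.empty

-- phase 1: partition lines into segments, opening a new one at each 'Title:' line
def pvStepB (segs : List (List String)) (line : String) : List (List String) :=
  if PySem.Str.startswith line "Title:" then segs ++ [[line]]
  else segs.dropLast ++ [segs.getLastD [] ++ [line]]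

def parse_websearch_results_py_alt (content : String) : List (List (String × String)) :=
  let lines := (PySem.Str.split? content "\n").getD []   -- sep ≠ "", so split? is always some
  let segments := lines.foldl pvStepB [[]]
  ((segments.map pvParseSegment).filter (fun d => !d.items.isEmpty)).map PySem.Dict.items

-- ===== PRECONDITION & SPEC =====
def Spec_parse_websearch_results_py (content : String) (out : List (List (String × String))) : Prop := out = parse_websearch_results_py_alt content
instance (content : String) (out : List (List (String × String))) : Decidable (Spec_parse_websearch_results_py content out) := by unfold Spec_parse_websearch_results_py; infer_instance

-- ===== CLAIM (what is proved, stated in full; the proofs are below) =====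
def Claim_equal_parse_websearch_results_py : Prop := ∀ (content : String), Dom_parse_websearch_results_py content → Spec_parse_websearch_results_py content (parse_websearch_results_py content)

-- ===== LEMMAS AND PROOFS =====

-- emit = the list-comprehension phase of B applied to a segment list
def pvEmit (segs : List (List String)) : List (List (String × String)) :=
  ((segs.map pvParseSegment).filter (fun d => !d.items.isEmpty)).map PySem.Dict.items

theorem pvEmit_append (s t : List (List String)) : pvEmit (s ++ t) = pvEmit s ++ pvEmit t := by
  simp [pvEmit]

-- B's fold only touches the last segment, so a prefix of closed segments passes through
theorem foldB_append (lines : List String) (segs : List (List String)) (cur : List String) :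
    lines.foldl pvStepB (segs ++ [cur]) = segs ++ lines.foldl pvStepB [cur] := by
  induction lines generalizing segs cur with
  | nil => rfl
  | cons line rest ih =>
    simp only [List.foldl_cons, pvStepB]
    by_cases h : PySem.Str.startswith line "Title:" = true
    · rw [if_pos h, if_pos h, ih (segs ++ [cur]) [line], ih [cur] [line], List.append_assoc]
    · rw [if_neg h, if_neg h, List.dropLast_concat, List.getLastD_concat]
      simp only [List.dropLast_singleton, List.getLastD, List.nil_append]
      exact ih segs (cur ++ [line])

theorem stepSeg_title (d : PySem.Dict String String) (line : String)
    (h : PySem.Str.startswith line "Title:" = true) :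
    pvStepSeg d line = d.insert "title" (PySem.Str.strip (PySem.Str.slice line (some 6) none)) := by
  simp only [pvStepSeg, pvPrefixes]
  rw [List.find?_cons_of_pos (p := fun pk : String × String => PySem.Str.startswith line pk.1)
    (by exact h)]
  simp

-- the non-Title branches of A's step are exactly B's per-line segment step
theorem stepA_not_title (rs : List (PySem.Dict String String)) (d : PySem.Dict String String)
    (line : String) (h : ¬ PySem.Str.startswith line "Title:" = true) :
    pvStepA (rs, d) line = (rs, pvStepSeg d line) := by
  simp only [pvStepA, pvStepSeg, pvPrefixes]
  rw [if_neg h,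
    List.find?_cons_of_neg (p := fun pk : String × String => PySem.Str.startswith line pk.1)
      (by exact h)]
  by_cases h2 : PySem.Str.startswith line "URL:" = true
  · rw [if_pos h2,
      List.find?_cons_of_pos (p := fun pk : String × String => PySem.Str.startswith line pk.1)
        (by exact h2)]
    simp
  · rw [if_neg h2,
      List.find?_cons_of_neg (p := fun pk : String × String => PySem.Str.startswith line pk.1)
        (by exact h2)]
    by_cases h3 : PySem.Str.startswith line "Description:" = true
    · rw [if_pos h3,
        List.find?_cons_of_pos (p := fun pk : String × String => PySem.Str.startswith line pk.1)
          (by exact h3)]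
      simp
    · rw [if_neg h3,
        List.find?_cons_of_neg (p := fun pk : String × String => PySem.Str.startswith line pk.1)
          (by exact h3)]
      simp [List.find?]

theorem parseSeg_concat (seg : List String) (line : String) :
    pvParseSegment (seg ++ [line]) = pvStepSeg (pvParseSegment seg) line := by
  simp [pvParseSegment]

-- main invariant: A's fold from (results, parsed current segment) matches B's remaining segments
theorem main_inv (lines : List String) (cur : List String) (rs : List (PySem.Dict String String)) :
    (let st := lines.foldl pvStepA (rs, pvParseSegment cur)
     (if st.2.items.isEmpty then st.1 else st.1 ++ [st.2]).map PySem.Dict.items)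
    = rs.map PySem.Dict.items ++ pvEmit (lines.foldl pvStepB [cur]) := by
  induction lines generalizing cur rs with
  | nil =>
    simp only [List.foldl_nil, pvEmit, List.map_cons, List.map_nil, List.filter_cons,
      List.filter_nil]
    by_cases h : (pvParseSegment cur).items.isEmpty = true
    · simp [h]
    · simp [h]
  | cons line rest ih =>
    simp only [List.foldl_cons]
    by_cases h : PySem.Str.startswith line "Title:" = true
    · have hA : pvStepA (rs, pvParseSegment cur) line =
        ((if (pvParseSegment cur).items.isEmpty then rs else rs ++ [pvParseSegment cur]),
         pvParseSegment [line]) := by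
        simp only [pvStepA]
        rw [if_pos h]
        have : pvParseSegment [line] =
            PySem.Dict.insert PySem.Dict.empty "title"
              (PySem.Str.strip (PySem.Str.slice line (some 6) none)) := by
          simp only [pvParseSegment, List.foldl_cons, List.foldl_nil]
          exact stepSeg_title _ _ h
        rw [this]
      have hB : pvStepB [cur] line = [cur] ++ [[line]] := by
        simp only [pvStepB]; rw [if_pos h]
      rw [hA, hB, foldB_append, pvEmit_append,
        ih [line] (if (pvParseSegment cur).items.isEmpty then rs else rs ++ [pvParseSegment cur])]
      by_cases hc : (pvParseSegment cur).items.isEmpty = true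
      · simp [hc, pvEmit]
      · simp [hc, pvEmit]
    · have hB : pvStepB [cur] line = [cur ++ [line]] := by
        simp only [pvStepB]
        rw [if_neg h]
        simp
      rw [stepA_not_title rs (pvParseSegment cur) line h, ← parseSeg_concat,
        ih (cur ++ [line]) rs, hB]

-- ===== VERDICT (by name: the statement is the Claim_ definition above) =====
theorem parse_websearch_results_py_spec : Claim_equal_parse_websearch_results_py := by
  intro content _
  show parse_websearch_results_py content = parse_websearch_results_py_alt content
  have h := main_inv ((PySem.Str.split? content "\n").getD []) [] []
  simpa [parse_websearch_results_py, parse_websearch_results_py_alt, pvEmit,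
    pvParseSegment] using h
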